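-- pv_equiv track=rewrite | github.com/cycleuser/OpenLaoKe | openlaoke/core/hyperauto/learning.py | _find_common_task
-- ===== SOURCE A (Python) =====
-- def _find_common_task(tasks: list[str]) -> str:
--     """Find common task pattern."""
--     if not tasks:
--         return "unknown"
--
--     words: dict[str, int] = {}
--     for task in tasks:
--         for word in task.lower().split():
--             if len(word) > 3:
--                 words[word] = words.get(word, 0) + 1
--
--     if not words:
--         return tasks[0]
--
--     return max(words, key=lambda w: words.get(w, 0))
-- ===== SOURCE B (Python) =====
-- def _find_common_task(tasks: list[str]) -> str:
--     """Find common task pattern (repeated-partition mode: no frequency dict)."""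
--     if not tasks:
--         return "unknown"
--     words = [w for task in tasks for w in task.lower().split() if len(w) > 3]
--     if not words:
--         return tasks[0]
--     best, best_count = None, 0
--     ws = words
--     while ws:
--         w = ws[0]
--         rest = [x for x in ws[1:] if x != w]
--         c = len(ws) - len(rest)  # number of occurrences of w in ws
--         if best_count < c:
--             best, best_count = w, c
--         ws = rest
--     return best
-- ===== Notes on version B (the rewrite author's own statement) =====
-- stated objective: alternative
-- what changed: Replaces the frequency dict plus max-over-keys with a repeated-partition mode: iteratively take the first remaining word, delete all its occurrences from the flat filtered word list to obtain its count, and keep the best (strict improvement preserves A's first-occurrence tie-break); no count table and no max-with-key are used.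
import Mathlib
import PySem

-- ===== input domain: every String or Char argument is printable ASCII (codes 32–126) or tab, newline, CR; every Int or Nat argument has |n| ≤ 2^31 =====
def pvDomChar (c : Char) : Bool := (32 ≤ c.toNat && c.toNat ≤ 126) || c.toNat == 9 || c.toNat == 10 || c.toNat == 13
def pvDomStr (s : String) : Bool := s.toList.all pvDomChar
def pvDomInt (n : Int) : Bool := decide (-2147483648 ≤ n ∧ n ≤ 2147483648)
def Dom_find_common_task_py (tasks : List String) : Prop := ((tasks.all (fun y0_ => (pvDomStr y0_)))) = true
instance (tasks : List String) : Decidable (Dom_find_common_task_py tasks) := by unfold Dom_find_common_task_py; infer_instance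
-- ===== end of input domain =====

-- B replaces A's frequency dict + max over keys by a repeated-partition mode: take the first
-- remaining word, delete all its occurrences (learning the count from the shrinkage), keep the
-- strictly best so far. Alternative decomposition, no count table; not faster.

-- ===== PORT A =====
def find_common_task_py (tasks : List String) : String :=
  match tasks with
  | [] => "unknown"
  | t0 :: _ =>
    -- words: dict[str,int] built by the nested loop 'words[word] = words.get(word, 0) + 1'
    let words : PySem.Dict String Int :=
      tasks.foldl (fun d task =>
        (PySem.Str.split₀ (PySem.Str.lower task)).foldl
          (fun d w => if 3 < PySem.Str.len w then d.insert w (d.getD w 0 + 1) else d) d)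
        PySem.Dict.empty
    if words.items = [] then t0
    else PySem.List.maxD words.keys (fun w => words.getD w 0) ""

-- ===== PORT B =====
-- the while loop of Source B: w = ws[0]; rest = [x for x in ws[1:] if x != w];
-- c = len(ws) - len(rest); if best_count < c: best, best_count = w, c; ws = rest
def pvModeLoop (ws : List String) (best : String) (bestc : Int) : String :=
  match ws with
  | [] => best
  | w :: t =>
    let rest := t.filter (fun x => x != w)
    let c : Int := ((w :: t).length : Int) - (rest.length : Int)
    if bestc < c then pvModeLoop rest w c else pvModeLoop rest best bestc
termination_by ws.length
decreasing_by all_goals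
  simp only [List.length_unattach, List.length_cons]
  exact Nat.lt_succ_of_le (le_trans (List.length_filter_le _ _) (by simp))



def find_common_task_py_alt (tasks : List String) : String :=
  match tasks with
  | [] => "unknown"
  | t0 :: _ =>
    let ws : List String :=
      tasks.flatMap (fun task =>
        (PySem.Str.split₀ (PySem.Str.lower task)).filter (fun w => 3 < PySem.Str.len w))
    if ws = [] then t0
    -- best starts as Python's None (never returned since ws ≠ []); "" stands in for it
    else pvModeLoop ws "" 0

-- ===== PRECONDITION & SPEC =====
def Spec_find_common_task_py (tasks : List String) (out : String) : Prop := out = find_common_task_py_alt tasks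
instance (tasks : List String) (out : String) : Decidable (Spec_find_common_task_py tasks out) := by unfold Spec_find_common_task_py; infer_instance

-- ===== CLAIM (what is proved, stated in full; the proofs are below) =====
def Claim_equal_find_common_task_py : Prop := ∀ (tasks : List String), Dom_find_common_task_py tasks → Spec_find_common_task_py tasks (find_common_task_py tasks)

-- ===== LEMMAS AND PROOFS =====

-- the per-task conditional counting loop is the counting loop over the filtered words
theorem foldl_ite_eq_foldl_filter {α β : Type} (p : α → Prop) [DecidablePred p] (f : β → α → β) :
    ∀ (l : List α) (init : β),
      l.foldl (fun d w => if p w then f d w else d) init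
        = (l.filter (fun w => decide (p w))).foldl f init := by
  intro l
  induction l with
  | nil => intro init; rfl
  | cons x t ih =>
    intro init
    by_cases h : p x <;> simp [h, ih]

-- the nested loop over tasks is the loop over the flattened word list
theorem foldl_foldl_eq_flatMap {α β γ : Type} (g : α → List β) (f : γ → β → γ) :
    ∀ (l : List α) (init : γ),
      l.foldl (fun d x => (g x).foldl f d) init = (l.flatMap g).foldl f init := by
  intro l
  induction l with
  | nil => intro init; rfl
  | cons x t ih => intro init; simp [List.flatMap_cons, List.foldl_append, ih]

-- max with a key ignores duplicates: max over set(xs) (first-occurrence order) = max over xs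
theorem max?_ofList {α : Type} [DecidableEq α] (key : α → Int) (xs : List α) :
    PySem.List.max? (PySem.Set.ofList xs) key = PySem.List.max? xs key := by
  induction xs using List.reverseRecOn with
  | nil => rfl
  | append_singleton t x ih =>
    rw [PySem.Set.ofList_append_singleton]
    by_cases hx : x ∈ t
    · rw [PySem.Set.add_of_mem (by simpa [PySem.Set.mem_ofList] using hx), ih]
      have hne : PySem.List.max? t key ≠ none := by
        intro h
        rw [PySem.List.max?_eq_none_iff] at h
        simp [h] at hx
      obtain ⟨m, hm⟩ := Option.ne_none_iff_exists'.mp hne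
      have hle : key x ≤ key m := PySem.List.max?_isMax hm x hx
      simp [PySem.List.max?, List.foldl_append] at *
      simp [hm, not_lt_of_ge hle]
    · rw [PySem.Set.add_of_not_mem (by simpa [PySem.Set.mem_ofList] using hx)]
      simp only [PySem.List.max?, List.foldl_append] at *
      rw [ih]

theorem ofList_eq_nil_iff {α : Type} [DecidableEq α] (xs : List α) :
    PySem.Set.ofList xs = [] ↔ xs = [] := by
  constructor
  · intro h
    cases xs with
    | nil => rfl
    | cons x t =>
      exfalso
      have : x ∈ PySem.Set.ofList (x :: t) := by
        simp [PySem.Set.mem_ofList]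
      simp [h] at this
  · intro h; simp [h, PySem.Set.ofList]


def pvMaxStep {α : Type} (k : α → Int) (acc : Option α) (x : α) : Option α :=
  match acc with
  | none => some x
  | some m => if k m < k x then some x else some m

theorem max?_eq_foldl_pvMaxStep {α : Type} (k : α → Int) (xs : List α) :
    PySem.List.max? xs k = xs.foldl (pvMaxStep k) none := by
  rfl

theorem foldl_pvMaxStep_some {α : Type} (k : α → Int) :
    ∀ (t : List α) (a : α),
      t.foldl (pvMaxStep k) (some a)
        = some (match t.foldl (pvMaxStep k) none with
                | none => a
                | some m => if k a < k m then m else a) := by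
  intro t
  induction t with
  | nil => intro a; rfl
  | cons x s ih =>
    intro a
    simp only [List.foldl_cons]
    have hstep1 : pvMaxStep k (some a) x = some (if k a < k x then x else a) := by
      simp only [pvMaxStep]; split_ifs <;> rfl
    have hstep2 : pvMaxStep k none x = some x := rfl
    rw [hstep1, hstep2, ih (if k a < k x then x else a), ih x]
    cases hM : s.foldl (pvMaxStep k) none with
    | none => simp
    | some m =>
      simp only [Option.some.injEq]
      split_ifs <;> first | rfl | omega

theorem foldl_pvMaxStep_filter_ne {α : Type} [DecidableEq α] (k : α → Int) (w : α) :
    ∀ (t : List α) (a : α), k w ≤ k a →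
      t.foldl (pvMaxStep k) (some a)
        = (t.filter (fun x => x != w)).foldl (pvMaxStep k) (some a) := by
  intro t
  induction t with
  | nil => intro a _; rfl
  | cons x s ih =>
    intro a ha
    by_cases hx : x = w
    · subst hx
      have h1 : pvMaxStep k (some a) x = some a := by
        simp [pvMaxStep, not_lt_of_ge ha]
      simp [h1, ih a ha]
    · have hstep : pvMaxStep k (some a) x = some (if k a < k x then x else a) := by
        simp only [pvMaxStep]; split_ifs <;> rfl
      have hle : k w ≤ k (if k a < k x then x else a) := by
        split_ifs with h <;> omega
      simp [hx, hstep, ih _ hle]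

theorem max?_count_cons {α : Type} [DecidableEq α] (w : α) (t : List α) :
    PySem.List.max? (w :: t) (fun x => ((w :: t).count x : Int))
      = some (match PySem.List.max? (t.filter (fun x => x != w))
                      (fun x => ((w :: t).count x : Int)) with
              | none => w
              | some m => if ((w :: t).count w : Int) < ((w :: t).count m : Int) then m else w) := by
  have h1 : PySem.List.max? (w :: t) (fun x => ((w :: t).count x : Int))
      = t.foldl (pvMaxStep (fun x => ((w :: t).count x : Int))) (some w) := by
    rw [max?_eq_foldl_pvMaxStep]; rfl
  rw [h1, foldl_pvMaxStep_filter_ne _ w t w le_rfl, foldl_pvMaxStep_some,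
      ← max?_eq_foldl_pvMaxStep]

theorem foldl_pvMaxStep_congr {α : Type} (k1 k2 : α → Int) :
    ∀ (t : List α) (a : Option α), (∀ x ∈ t, k1 x = k2 x) →
      (∀ m, a = some m → k1 m = k2 m) →
      t.foldl (pvMaxStep k1) a = t.foldl (pvMaxStep k2) a := by
  intro t
  induction t with
  | nil => intro a _ _; rfl
  | cons x s ih =>
    intro a hmem hacc
    have hx : k1 x = k2 x := hmem x (by simp)
    have hstep : pvMaxStep k1 a x = pvMaxStep k2 a x := by
      cases a with
      | none => rfl
      | some m => simp [pvMaxStep, hx, hacc m rfl]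
    rw [List.foldl_cons, List.foldl_cons, hstep]
    refine ih _ (fun y hy => hmem y (by simp [hy])) ?_
    intro m hm
    cases a with
    | none =>
      simp only [pvMaxStep] at hm
      injection hm with h
      subst h; exact hx
    | some m0 =>
      simp only [pvMaxStep] at hm
      split_ifs at hm <;> (injection hm with h; subst h)
      · exact hmem _ (by simp)
      · exact hacc _ rfl

theorem count_filter_ne_self {α : Type} [DecidableEq α] (w : α) (t : List α) (x : α)
    (hx : x ≠ w) : (t.filter (fun y => y != w)).count x = t.count x := by
  induction t with
  | nil => rfl
  | cons y s ih =>
    by_cases hy : y = w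
    · subst hy
      simp [List.filter_cons, List.count_cons, ih, hx]
      exact fun h => hx h.symm
    · simp [List.count_cons, hy, ih]

theorem length_filter_ne {α : Type} [DecidableEq α] (w : α) (t : List α) :
    (t.filter (fun y => y != w)).length = t.length - t.count w := by
  induction t with
  | nil => rfl
  | cons y s ih =>
    have hc : s.count w ≤ s.length := List.count_le_length
    by_cases hy : y = w
    · subst hy
      simp [List.filter_cons, List.count_cons, ih]
    · simp [hy, ih]
      omega

theorem pvModeLoop_spec :
    ∀ (n : Nat) (ws : List String), ws.length ≤ n → ∀ (best : String) (bestc : Int),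
      pvModeLoop ws best bestc
        = match PySem.List.max? ws (fun x => (ws.count x : Int)) with
          | none => best
          | some m => if bestc < (ws.count m : Int) then m else best := by
  intro n
  induction n with
  | zero =>
    intro ws hws best bestc
    have h := List.length_eq_zero_iff.mp (Nat.le_zero.mp hws)
    subst h
    rw [pvModeLoop]
    rfl
  | succ n ih =>
    intro ws hws best bestc
    cases ws with
    | nil => rw [pvModeLoop]; rfl
    | cons w t =>
      have hcount : t.count w ≤ t.length := List.count_le_length
      have hlenf : (t.filter (fun x => x != w)).length = t.length - t.count w := length_filter_ne w t
      have hlen : (t.filter (fun x => x != w)).length ≤ n := by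
        simp only [List.length_cons] at hws; omega
      have hc : ((w :: t).length : Int) - ((t.filter (fun x => x != w)).length : Int)
          = (((w :: t).count w : Nat) : Int) := by
        rw [hlenf]; simp; omega
      rw [pvModeLoop]
      rw [ih _ hlen, ih _ hlen]
      have hck : PySem.List.max? (t.filter (fun x => x != w)) (fun x => ((t.filter (fun x => x != w)).count x : Int))
          = PySem.List.max? (t.filter (fun x => x != w)) (fun x => (((w :: t).count x : Nat) : Int)) := by
        rw [max?_eq_foldl_pvMaxStep, max?_eq_foldl_pvMaxStep]
        refine foldl_pvMaxStep_congr _ _ _ none ?_ (by intro m h; cases h)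
        intro x hx
        have hxw : x ≠ w := by
          have := List.of_mem_filter hx; simpa using this
        rw [count_filter_ne_self w t x hxw]
        simp [List.count_cons]
        exact fun h => hxw h.symm
      rw [hck, max?_count_cons w t]
      cases hM : PySem.List.max? (t.filter (fun x => x != w)) (fun x => (((w :: t).count x : Nat) : Int)) with
      | none =>
        simp only []
        rw [hc]
      | some m =>
        have hmem : m ∈ t.filter (fun x => x != w) := PySem.List.max?_mem hM
        have hxw : m ≠ w := by
          have := List.of_mem_filter hmem; simpa using this
        have hmc : ((t.filter (fun x => x != w)).count m : Int) = (((w :: t).count m : Nat) : Int) := by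
          rw [count_filter_ne_self w t m hxw]
          simp [List.count_cons]
          exact fun h => hxw h.symm
        simp only []
        rw [hc, hmc]
        split_ifs <;> first | rfl | omega

-- ===== VERDICT (by name: the statement is the Claim_ definition above) =====
theorem find_common_task_py_spec : Claim_equal_find_common_task_py := by
  intro tasks _
  unfold Spec_find_common_task_py find_common_task_py find_common_task_py_alt
  cases tasks with
  | nil => rfl
  | cons t0 rest =>
    simp only
    set ws : List String :=
      (t0 :: rest).flatMap (fun task =>
        (PySem.Str.split₀ (PySem.Str.lower task)).filter (fun w => 3 < PySem.Str.len w)) with hws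
    have hdict :
        (t0 :: rest).foldl (fun d task =>
          (PySem.Str.split₀ (PySem.Str.lower task)).foldl
            (fun d w => if 3 < PySem.Str.len w then d.insert w (d.getD w 0 + 1) else d) d)
          PySem.Dict.empty = PySem.Dict.counter ws := by
      have e1 : ∀ (d : PySem.Dict String Int) (task : String),
          (PySem.Str.split₀ (PySem.Str.lower task)).foldl
            (fun d w => if 3 < PySem.Str.len w then d.insert w (d.getD w 0 + 1) else d) d
          = ((PySem.Str.split₀ (PySem.Str.lower task)).filter (fun w => decide (3 < PySem.Str.len w))).foldl
            (fun d w => d.insert w (d.getD w 0 + 1)) d :=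
        fun d task => foldl_ite_eq_foldl_filter _ _ _ d
      simp only [e1]
      rw [foldl_foldl_eq_flatMap, ← hws]
      exact PySem.Dict.foldl_insert_getD_add_one_eq_counter ws
    rw [hdict]
    have hkeys : (PySem.Dict.counter ws).keys = PySem.Set.ofList ws := PySem.Dict.keys_counter ws
    have hempty : ((PySem.Dict.counter ws).items = []) ↔ (ws = []) := by
      constructor
      · intro h
        have : (PySem.Dict.counter ws).keys = [] := by
          simp [PySem.Dict.keys, h]
        rw [hkeys] at this
        exact (ofList_eq_nil_iff ws).mp this
      · intro h; simp [h]; rfl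
    by_cases hw : ws = []
    · rw [if_pos (hempty.mpr hw), if_pos hw]
    · rw [if_neg (fun h => hw (hempty.mp h)), if_neg hw]
      have hkey : (fun w => (PySem.Dict.counter ws).getD w 0) = (fun w => (ws.count w : Int)) := by
        funext w
        simp [PySem.Dict.getD_counter ws w]
      -- A'"'"'s side: maxD over the distinct keys = maxD over the flat word list
      rw [hkey, hkeys]
      unfold PySem.List.maxD
      rw [max?_ofList]
      -- B'"'"'s side: the partition loop computes the same first maximal element
      rw [pvModeLoop_spec ws.length ws le_rfl "" 0]
      cases hM : PySem.List.max? ws (fun x => (ws.count x : Int)) with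
      | none => exact absurd ((PySem.List.max?_eq_none_iff _ _).mp hM) hw
      | some m =>
        have hmem : m ∈ ws := PySem.List.max?_mem hM
        have hpos : 0 < ws.count m := List.count_pos_iff.mpr hmem
        simp only [Option.getD_some]
        rw [if_pos (by exact_mod_cast hpos)]
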